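-- pv_equiv track=rewrite | github.com/slimissa/cagoule-bench | venv/lib/python3.12/site-packages/cagoule/sbox.py | verify_sbox_bijective
-- ===== SOURCE A (Python) =====
-- _EXHAUSTIVE_THRESHOLD = 100
--
-- def is_bijective_exhaustive(c: int, p: int) -> bool:
--     """
--     Vérification exhaustive de la bijectivité.
--     Utilisée uniquement pour les petits p (p < seuil).
--     """
--     seen = set()
--     for x in range(p):
--         y = (pow(x, 3, p) + c * x) % p
--         if y in seen:
--             return False
--         seen.add(y)
--     return True
--
-- def verify_sbox_bijective(c: int, p: int) -> bool:
--     """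
--     Vérifie si f(x) = x³ + cx est bijective sur Z/pZ.
--
--     Pour p=2 : aucun c n'est bijectif (car 1+c ≡ 0 mod 2 pour c impair)
--     Pour p=3 : vérification directe
--     Pour p < seuil : vérification exhaustive
--     Pour p >= seuil : retourne False (fallback recommandé)
--     """
--     if p == 2:
--         # x³ + c*x : x=0→0, x=1→1+c
--         # Bijectif ssi 1+c ≡ 1 mod 2 → c pair, mais c=0 interdit
--         return False
--
--     if p == 3:
--         values = set()
--         for x in range(3):
--             values.add((pow(x, 3, p) + c * x) % p)
--         return len(values) == 3
--
--     if p < _EXHAUSTIVE_THRESHOLD: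
--         return is_bijective_exhaustive(c, p)
--
--     # Pour les grands p, on préfère le fallback x^d
--     # La condition de Legendre n'est pas toujours fiable
--     return False
-- ===== SOURCE B (Python) =====
-- _EXHAUSTIVE_THRESHOLD = 100
--
-- def verify_sbox_bijective(c: int, p: int) -> bool:
--     if p == 2:
--         return False
--     if p >= _EXHAUSTIVE_THRESHOLD:
--         return False
--     vals = sorted((pow(x, 3, p) + c * x) % p for x in range(p))
--     return all(a != b for a, b in zip(vals, vals[1:]))
-- ===== Notes on version B (the rewrite author's own statement) =====
-- stated objective: alternative
-- what changed: Replaced the hash-set early-exit scan (and the separate helper plus the redundant p==3 branch) by building the full value list, sorting it, and scanning adjacent pairs for a duplicate.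
import Mathlib
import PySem

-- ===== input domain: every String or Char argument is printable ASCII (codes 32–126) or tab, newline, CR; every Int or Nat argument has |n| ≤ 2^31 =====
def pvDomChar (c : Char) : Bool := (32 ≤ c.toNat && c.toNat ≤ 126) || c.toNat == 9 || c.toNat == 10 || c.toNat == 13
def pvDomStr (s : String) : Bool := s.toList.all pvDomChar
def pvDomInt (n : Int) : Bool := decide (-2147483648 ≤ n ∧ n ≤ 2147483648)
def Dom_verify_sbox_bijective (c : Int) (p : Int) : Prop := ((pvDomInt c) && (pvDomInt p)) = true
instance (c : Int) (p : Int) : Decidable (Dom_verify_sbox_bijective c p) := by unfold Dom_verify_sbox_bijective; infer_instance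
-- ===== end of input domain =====

-- B replaces A's hash-set early-exit duplicate scan (plus its helper and the redundant p==3 branch)
-- by sort-then-adjacent-scan duplicate detection; objective: alternative (same exact results).

-- ===== PORT A =====
-- (pow(x, 3, p) + c * x) % p — the value expression both Pythons compute verbatim
def pvSboxVal (c : Int) (p : Int) (x : Int) : Int :=
  PySem.Int.mod (PySem.Int.powMod x 3 p + c * x) p

def pvExhLoop (c : Int) (p : Int) : List Int → PySem.Set Int → Bool
  | [], _ => true
  | x :: xs, seen =>
    let y := pvSboxVal c p x
    if PySem.Set.contains seen y then false
    else pvExhLoop c p xs (PySem.Set.add seen y)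

def is_bijective_exhaustive (c : Int) (p : Int) : Bool :=
  pvExhLoop c p (PySem.List.pyRange 0 p 1) PySem.Set.empty

def verify_sbox_bijective (c : Int) (p : Int) : Bool :=
  if p = 2 then false
  else if p = 3 then
    let values := (PySem.List.pyRange 0 3 1).foldl
      (fun s x => PySem.Set.add s (pvSboxVal c p x)) PySem.Set.empty
    PySem.Set.len values == 3
  else if p < 100 then is_bijective_exhaustive c p
  else false

-- ===== PORT B =====
def verify_sbox_bijective_alt (c : Int) (p : Int) : Bool :=
  if p = 2 then false
  else if 100 ≤ p then false
  else
    let vals := PySem.List.sorted ((PySem.List.pyRange 0 p 1).map (pvSboxVal c p)) (fun v => v) false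
    (vals.zip (PySem.List.slice vals (some 1) none)).all (fun ab => ab.1 != ab.2)

-- ===== PRECONDITION & SPEC =====
def Spec_verify_sbox_bijective (c : Int) (p : Int) (out : Bool) : Prop := out = verify_sbox_bijective_alt c p
instance (c : Int) (p : Int) (out : Bool) : Decidable (Spec_verify_sbox_bijective c p out) := by unfold Spec_verify_sbox_bijective; infer_instance

-- ===== CLAIM (what is proved, stated in full; the proofs are below) =====
def Claim_equal_verify_sbox_bijective : Prop := ∀ (c : Int) (p : Int), Dom_verify_sbox_bijective c p → Spec_verify_sbox_bijective c p (verify_sbox_bijective c p)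

-- ===== LEMMAS AND PROOFS =====


lemma pvExhLoop_eq_true_iff (c p : Int) :
    ∀ (l : List Int) (s : PySem.Set Int),
      pvExhLoop c p l s = true ↔
        ((l.map (pvSboxVal c p)).Nodup ∧ ∀ y ∈ l.map (pvSboxVal c p), y ∉ s) := by
  intro l
  induction l with
  | nil => intro s; simp [pvExhLoop]
  | cons x xs ih =>
    intro s
    simp only [pvExhLoop]
    simp [ih, PySem.Set.mem_add, List.nodup_cons]
    constructor
    · rintro ⟨h1, h2, h3⟩
      exact ⟨⟨fun a ha => (h3 a ha).2, h2⟩, h1, fun a ha => (h3 a ha).1⟩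
    · rintro ⟨⟨h4, h2⟩, h1, h5⟩
      exact ⟨h1, h2, fun a ha => ⟨h5 a ha, h4 a ha⟩⟩

lemma zip_tail_all_ne_iff (l : List Int) :
    ((l.zip l.tail).all fun ab => ab.1 != ab.2) = true ↔ l.IsChain (· ≠ ·) := by
  induction l with
  | nil => simp
  | cons x xs ih =>
    cases xs with
    | nil => simp
    | cons y t =>
      simp only [List.tail_cons, List.zip_cons_cons, List.all_cons, List.isChain_cons_cons,
        Bool.and_eq_true, bne_iff_ne, ne_eq] at *
      rw [ih]

lemma chain_lt_of_ne_le (l : List Int) :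
    l.IsChain (· ≠ ·) → l.IsChain (· ≤ ·) → l.IsChain (fun a b : Int => a < b) := by
  induction l with
  | nil => simp
  | cons x xs ih =>
    cases xs with
    | nil => simp
    | cons y t =>
      intro h1 h2
      rw [List.isChain_cons_cons] at *
      exact ⟨lt_of_le_of_ne h2.1 h1.1, ih h1.2 h2.2⟩

lemma chain_ne_iff_nodup (l : List Int) (h : l.Pairwise (· ≤ ·)) :
    l.IsChain (· ≠ ·) ↔ l.Nodup := by
  constructor
  · intro hne
    have hlt : l.IsChain (fun a b : Int => a < b) := chain_lt_of_ne_le l hne h.isChain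
    have hpw : l.Pairwise (fun a b : Int => a < b) := List.isChain_iff_pairwise.mp hlt
    exact hpw.imp (fun {a b} hab => ne_of_lt hab)
  · intro hnd
    exact List.Pairwise.isChain hnd

lemma sorted_scan_iff_nodup (xs : List Int) :
    (((PySem.List.sorted xs (fun v => v) false).zip
        (PySem.List.slice (PySem.List.sorted xs (fun v => v) false) (some 1) none)).all
      fun ab => ab.1 != ab.2) = true ↔ xs.Nodup := by
  rw [PySem.List.slice_from_one, zip_tail_all_ne_iff,
    chain_ne_iff_nodup _ (PySem.List.sorted_pairwise xs (fun v => v)),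
    (PySem.List.sorted_perm xs (fun v => v) false).nodup_iff]

lemma foldl_add_sublist (l : List Int) :
    ∀ s : List Int, (List.foldl PySem.Set.add s l).Sublist (s ++ l) := by
  induction l with
  | nil => intro s; simp
  | cons x xs ih =>
    intro s
    simp only [List.foldl_cons]
    refine (ih (PySem.Set.add s x)).trans ?_
    by_cases hc : PySem.Set.contains s x = true
    · simp only [PySem.Set.add, hc, if_pos]
      exact ((List.sublist_cons_self x xs).append_left s)
    · simp only [PySem.Set.add, hc, Bool.false_eq_true, if_false]
      rw [List.append_assoc]
      simp

lemma setlen_ofList_eq_length_iff (l : List Int) :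
    PySem.Set.len (PySem.Set.ofList l) = (l.length : Int) ↔ l.Nodup := by
  have hsub : (PySem.Set.ofList l).Sublist l := by
    rw [PySem.Set.ofList_eq_foldl]
    simpa using foldl_add_sublist l []
  constructor
  · intro h
    have hlen : (PySem.Set.ofList l).length = l.length := by
      have h2 : ((PySem.Set.ofList l).length : Int) = (l.length : Int) := h
      exact_mod_cast h2
    have heq := hsub.eq_of_length hlen
    rw [← heq]
    exact PySem.Set.nodup_ofList l
  · intro h
    rw [PySem.Set.ofList_eq_self_of_nodup l h]
    rfl

lemma pvSetEmpty_eq : (PySem.Set.empty : PySem.Set Int) = ([] : List Int) := rfl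

theorem main_eq (c p : Int) : verify_sbox_bijective c p = verify_sbox_bijective_alt c p := by
  unfold verify_sbox_bijective verify_sbox_bijective_alt is_bijective_exhaustive
  by_cases h2 : p = 2
  · simp [h2]
  by_cases h3 : p = 3
  · subst h3
    simp only [if_neg h2, if_neg (by omega : ¬ (100 : Int) ≤ 3)]
    rw [if_pos trivial]
    have hof : List.foldl (fun s x => PySem.Set.add s (pvSboxVal c 3 x)) PySem.Set.empty
        (PySem.List.pyRange 0 3 1)
        = PySem.Set.ofList ((PySem.List.pyRange 0 3 1).map (pvSboxVal c 3)) := by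
      rw [PySem.Set.ofList_eq_foldl, List.foldl_map, pvSetEmpty_eq]
    rw [Bool.eq_iff_iff, beq_iff_eq, sorted_scan_iff_nodup, hof]
    have hlen : ((PySem.List.pyRange 0 3 1).map (pvSboxVal c 3)).length = 3 := by
      simp [PySem.List.length_pyRange_one]
    have hiff := setlen_ofList_eq_length_iff ((PySem.List.pyRange 0 3 1).map (pvSboxVal c 3))
    rw [hlen] at hiff
    simpa using hiff
  by_cases hlt : p < 100
  · simp only [if_neg h2, if_neg h3, if_pos hlt, if_neg (by omega : ¬ (100 : Int) ≤ p)]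
    rw [Bool.eq_iff_iff, pvExhLoop_eq_true_iff, sorted_scan_iff_nodup]
    simp [PySem.Set.empty]
  · simp [h2, h3, hlt, (by omega : (100 : Int) ≤ p)]

-- ===== VERDICT (by name: the statement is the Claim_ definition above) =====
theorem verify_sbox_bijective_spec : Claim_equal_verify_sbox_bijective := by
  intro c p _
  unfold Spec_verify_sbox_bijective
  exact main_eq c p
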